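-- pv_equiv track=rewrite | github.com/timruhkopf/NachhilfeDNATransformation | src/burrowswheeler.py | find_rep_number
-- ===== SOURCE A (Python) =====
-- def find_rep_number(sequenz): #Wiederholungen in der rechten Spalte
-- #wieviele Buchstaben habe ich jeweils
--     """
--
--     RECHTE SPALTE!!!!!!!
--     TTGGATAA$C --- [0,1,0,1,0,2,1,2,0,0]  # python zählt ab 0!
--     @param sequenz:
--     @return:
--     """
--     # (1) finde die einzigartigen Buchstaben.
--     uniques = set(sequenz)# Erzeuge eine Menge der einzigartigen Buchstaben
--     #jeder Buchstabe kommt im set nur einmal vor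
--
--
--     # (2) erzeuge ein dictionary, mit der Anzahl an "wie oft habe ich den
--     # Buchstaben gesehen"
--     # Am Anfang 0 mal gesehen
--     # ergebnis: {'T':0, 'G':0, 'A':0, '$':0} "counter dictionary"
--     unique_counters = {}
--     for k in uniques:
--         unique_counters[k] = 0
--
--     # (3) lies von links durch die sequenz und schau im dictionary nach wie
--     # oft dieser schon gesehen wurde. Update dann das dictionary (weil wir ja
--     #  jetzt einen mehr gesehen haben)
--     rep_number = []# generiert mir eine Liste von Zahlen
--     for v in sequenz:
--         rep_number.append(unique_counters[v])
--         unique_counters[v] += 1  # update das dictionary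
--
--     return rep_number #Ausgabe der Funktion
-- ===== SOURCE B (Python) =====
-- def find_rep_number(sequenz):
--     # Each position's rank = number of earlier occurrences of its character:
--     # computed independently per position by counting in the prefix.
--     return [sequenz[:i].count(c) for i, c in enumerate(sequenz)]
-- ===== Notes on version B (the rewrite author's own statement) =====
-- stated objective: simpler
-- what changed: Replaces the set+counter-dict incremental pass with a one-line comprehension that counts each character's occurrences in the prefix before its position.
import Mathlib
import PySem

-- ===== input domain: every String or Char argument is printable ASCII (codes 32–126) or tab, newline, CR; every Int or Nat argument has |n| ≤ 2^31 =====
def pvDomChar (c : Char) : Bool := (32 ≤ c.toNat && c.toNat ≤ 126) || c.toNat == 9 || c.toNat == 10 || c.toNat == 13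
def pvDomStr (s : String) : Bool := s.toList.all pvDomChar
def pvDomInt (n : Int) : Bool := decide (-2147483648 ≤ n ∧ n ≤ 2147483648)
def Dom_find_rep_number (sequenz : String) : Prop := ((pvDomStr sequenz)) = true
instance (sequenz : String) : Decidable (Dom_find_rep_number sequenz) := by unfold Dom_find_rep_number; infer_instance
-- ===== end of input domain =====

-- B replaces A's set + counter-dict single pass by a per-position prefix count (simpler, one comprehension).

-- ===== PORT A =====
-- A: uniques = set(sequenz); counter dict initialised to 0; one left-to-right pass appending
-- the current count and incrementing it.  unique_counters[v] is always present (v ∈ uniques),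
-- so the lookup is getD with default 0 only formally; it is exact here.
def find_rep_number (sequenz : String) : List Int :=
  let uniques := PySem.Set.ofList sequenz.toList
  let unique_counters : PySem.Dict Char Int :=
    uniques.foldl (fun d k => d.insert k 0) PySem.Dict.empty
  let st := sequenz.toList.foldl
    (fun (st : List Int × PySem.Dict Char Int) v =>
      (st.1 ++ [st.2.getD v 0], st.2.insert v (st.2.getD v 0 + 1)))
    ([], unique_counters)
  st.1

-- ===== PORT B =====
-- B: [sequenz[:i].count(c) for i, c in enumerate(sequenz)]; s[:i].count(c) for a single
-- character c is exactly the count of c among the first i characters.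
def find_rep_number_alt (sequenz : String) : List Int :=
  let xs := sequenz.toList
  (PySem.List.enumerate xs).map
    (fun ic => ((PySem.List.slice xs none (some ic.1)).count ic.2 : Int))

-- ===== PRECONDITION & SPEC =====
def Spec_find_rep_number (sequenz : String) (out : List Int) : Prop := out = find_rep_number_alt sequenz
instance (sequenz : String) (out : List Int) : Decidable (Spec_find_rep_number sequenz out) := by unfold Spec_find_rep_number; infer_instance

-- ===== CLAIM (what is proved, stated in full; the proofs are below) =====
def Claim_equal_find_rep_number : Prop := ∀ (sequenz : String), Dom_find_rep_number sequenz → Spec_find_rep_number sequenz (find_rep_number sequenz)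

-- ===== LEMMAS AND PROOFS =====

-- structural form of A's accumulating loop
def prefCounts : List Char → PySem.Dict Char Int → List Int
  | [], _ => []
  | x :: xs, d => d.getD x 0 :: prefCounts xs (d.insert x (d.getD x 0 + 1))

theorem foldl_eq_prefCounts (xs : List Char) (acc : List Int) (d : PySem.Dict Char Int) :
    (xs.foldl (fun (st : List Int × PySem.Dict Char Int) v =>
      (st.1 ++ [st.2.getD v 0], st.2.insert v (st.2.getD v 0 + 1))) (acc, d)).1
      = acc ++ prefCounts xs d := by
  induction xs generalizing acc d with
  | nil => simp [prefCounts]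
  | cons x xs ih => simp [prefCounts, List.foldl, ih]

theorem length_prefCounts (xs : List Char) (d : PySem.Dict Char Int) :
    (prefCounts xs d).length = xs.length := by
  induction xs generalizing d with
  | nil => rfl
  | cons x xs ih => simp [prefCounts, ih]

theorem prefCounts_getElem (xs : List Char) (d : PySem.Dict Char Int) (k : Nat)
    (h : k < xs.length) :
    (prefCounts xs d)[k]'(by rw [length_prefCounts]; exact h)
      = d.getD xs[k] 0 + ((xs.take k).count xs[k] : Int) := by
  induction xs generalizing d k with
  | nil => simp at h
  | cons x xs ih =>
    cases k with
    | zero => simp [prefCounts]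
    | succ k =>
      have hk : k < xs.length := by simpa using h
      have := ih (d.insert x (d.getD x 0 + 1)) k hk
      simp only [prefCounts, List.getElem_cons_succ, this, PySem.Dict.getD_insert,
        List.take_succ_cons, List.count_cons]
      by_cases hx : xs[k] = x
      · simp [hx]; omega
      · simp [hx, Ne.symm hx]

theorem getD_init_zero (l : List Char) (c : Char) :
    ((PySem.Set.ofList l).foldl (fun d k => d.insert k 0)
      (PySem.Dict.empty : PySem.Dict Char Int)).getD c 0 = 0 := by
  have key : ∀ (u : List Char) (d : PySem.Dict Char Int), d.getD c 0 = 0 →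
      (u.foldl (fun d k => d.insert k 0) d).getD c 0 = 0 := by
    intro u
    induction u with
    | nil => intro d h; simpa using h
    | cons x xs ih =>
      intro d h
      apply ih
      rw [PySem.Dict.getD_insert]
      split <;> simp [h]
  exact key (PySem.Set.ofList l) PySem.Dict.empty (by rfl)

-- ===== VERDICT (by name: the statement is the Claim_ definition above) =====
theorem find_rep_number_spec : Claim_equal_find_rep_number := by
  intro s _
  unfold Spec_find_rep_number find_rep_number find_rep_number_alt
  simp only [foldl_eq_prefCounts, List.nil_append]
  apply List.ext_getElem
  · simp [length_prefCounts, PySem.List.length_enumerate]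
  · intro k h1 h2
    have hk : k < s.toList.length := by simpa [length_prefCounts] using h1
    rw [prefCounts_getElem _ _ k hk]
    rw [getD_init_zero s.toList (s.toList[k]'hk)]
    simp only [List.getElem_map, PySem.List.getElem_enumerate]
    have : PySem.List.slice s.toList none (some ((0:Int) + (k:Nat))) = s.toList.take k := by
      rw [show ((0:Int) + (k:Nat)) = ((k:Nat):Int) by omega, PySem.List.slice_to_natCast]
    rw [this]
    omega
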